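-- pv_equiv track=rewrite | github.com/sentoxo/Advent-Of-Code-2019 | day04/main2.py | number_adjacent
-- ===== SOURCE A (Python) =====
-- def number_adjacent(number):
--     a = str(number)
--     for i in range(len(a)-1):
--         if a[i]==a[i+1]:
--             b = a.count(a[i])
--             if b == 2:
--                 return True
--             elif b == 3:
--                 if a.find(a, i) == i+2:
--                     return False
--
--     return False
-- ===== SOURCE B (Python) =====
-- def number_adjacent(number):
--     a = str(number)
--     counts = {}
--     for ch in a:
--         counts[ch] = counts.get(ch, 0) + 1
--     for d, c in counts.items():
--         if c == 2:
--             idx = a.index(d)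
--             if a[idx + 1] == d:
--                 return True
--     return False
-- ===== Notes on version B (the rewrite author's own statement) =====
-- stated objective: alternative
-- what changed: B replaces A's scan over adjacent index pairs with repeated str.count calls by building a character-frequency dict in one pass and then, for each distinct digit occurring exactly twice, checking with a single index() lookup whether its two occurrences are adjacent.
import Mathlib
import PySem

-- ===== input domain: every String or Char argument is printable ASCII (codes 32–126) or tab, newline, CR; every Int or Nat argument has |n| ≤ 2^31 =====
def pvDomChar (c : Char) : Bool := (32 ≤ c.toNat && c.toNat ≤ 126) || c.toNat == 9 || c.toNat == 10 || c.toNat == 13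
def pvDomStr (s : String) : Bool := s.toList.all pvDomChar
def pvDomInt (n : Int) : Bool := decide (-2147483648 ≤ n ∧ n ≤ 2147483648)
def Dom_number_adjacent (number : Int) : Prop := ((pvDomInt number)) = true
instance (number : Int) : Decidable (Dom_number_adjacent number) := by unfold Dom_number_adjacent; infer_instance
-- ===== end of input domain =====

-- B builds a character-frequency dict in one pass and checks adjacency only for digits occurring
-- exactly twice, instead of A's scan over adjacent index pairs with repeated str.count (objective: alternative).

-- ===== PORT A =====
-- 'for i in range(len(a)-1):' with early returns; recursion over the remaining index list
def pvALoop (a : List Char) : List Int → Bool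
  | [] => false
  | i :: rest =>
    if PySem.List.pyGetD a i ' ' = PySem.List.pyGetD a (i+1) ' ' then
      let b := PySem.Chars.count a [PySem.List.pyGetD a i ' ']
      if b = 2 then true
      else if b = 3 then
        if PySem.Chars.findFrom a a i none = i + 2 then false
        else pvALoop a rest
      else pvALoop a rest
    else pvALoop a rest

def number_adjacent (number : Int) : Bool :=
  let a := PySem.Int.toChars number
  pvALoop a (PySem.List.pyRange 0 (PySem.List.len a - 1) 1)

-- ===== PORT B =====
-- 'for d, c in counts.items():' with early return True; recursion over the remaining items.
-- Python's a.index(d) (ValueError) and a[idx+1] (IndexError) never raise here: d is a key built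
-- from a, and when c == 2 the first occurrence has a successor; the port uses index?/pyGet? there.
def pvBLoop (a : List Char) : List (Char × Int) → Bool
  | [] => false
  | (d, c) :: rest =>
    if c = 2 then
      match PySem.List.index? a d with
      | some idx =>
        if PySem.List.pyGet? a ((idx : Int) + 1) = some d then true else pvBLoop a rest
      | none => pvBLoop a rest
    else pvBLoop a rest

def number_adjacent_alt (number : Int) : Bool :=
  let a := PySem.Int.toChars number
  let counts := a.foldl (fun d ch => d.insert ch (d.getD ch 0 + 1)) PySem.Dict.empty
  pvBLoop a counts.items

-- ===== PRECONDITION & SPEC =====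
def Spec_number_adjacent (number : Int) (out : Bool) : Prop := out = number_adjacent_alt number
instance (number : Int) (out : Bool) : Decidable (Spec_number_adjacent number out) := by unfold Spec_number_adjacent; infer_instance

-- ===== CLAIM (what is proved, stated in full; the proofs are below) =====
def Claim_equal_number_adjacent : Prop := ∀ (number : Int), Dom_number_adjacent number → Spec_number_adjacent number (number_adjacent number)

-- ===== LEMMAS AND PROOFS =====

-- str.count of a single character is List.count
theorem pv_go (c : Char) (l : List Char) : ∀ (fuel acc : Nat), l.length ≤ fuel →
    PySem.Chars.count.go [c] fuel l acc = acc + l.count c := by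
  induction l with
  | nil => intro fuel acc _; cases fuel <;> simp [PySem.Chars.count.go]
  | cons h t ih =>
    intro fuel acc hf
    cases fuel with
    | zero => simp at hf
    | succ f =>
      simp only [PySem.Chars.count.go]
      by_cases hc : c = h
      · subst hc
        simp [List.isPrefixOf, ih f (acc+1) (by simpa using hf)]
        omega
      · simp [List.isPrefixOf, hc, Ne.symm hc, ih f acc (by simpa using hf)]

theorem pv_count_singleton (a : List Char) (c : Char) : PySem.Chars.count a [c] = a.count c := by
  simp [PySem.Chars.count, pv_go c a a.length 0 rfl.le]

-- a.find(a) == 0 on a nonempty string, hence A's 'a.find(a, i) == i+2' test never fires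
theorem pv_find_self (a : List Char) : PySem.Chars.find a a = 0 := by
  have hin : a <:+: a := List.infix_refl a
  have h0 : 0 ≤ PySem.Chars.find a a := (PySem.Chars.find_nonneg_iff a a).2 hin
  have hs := PySem.Chars.find_spec h0
  by_contra hne
  have hpos : 0 < (PySem.Chars.find a a).toNat := by omega
  exact hs.2 0 hpos (by simp)

theorem pv_findFrom_self_ne (a : List Char) (i : Int) (h0 : 0 ≤ i) (h1 : i.toNat ≤ a.length)
    (ha : a ≠ []) : PySem.Chars.findFrom a a i none ≠ i + 2 := by
  have hi : i = ((i.toNat : Nat) : Int) := by omega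
  rw [hi, PySem.Chars.findFrom_natCast a a i.toNat h1]
  split_ifs with h
  · omega
  · have hfind : a <:+: a.drop i.toNat := (PySem.Chars.find_ne_neg_one_iff _ _).1 h
    have hlen : a.length ≤ (a.drop i.toNat).length := hfind.length_le
    simp at hlen
    have hz : i.toNat = 0 := by
      rcases Nat.eq_zero_or_pos i.toNat with h' | h'
      · exact h'
      · exfalso; have := List.length_pos_of_ne_nil ha; omega
    rw [hz]
    simp [pv_find_self a]

-- A's loop is an 'any' over its (in-range) index list
theorem pvALoop_eq_any (a : List Char) (l : List Int)
    (h : ∀ i ∈ l, 0 ≤ i ∧ i + 1 < (a.length : Int)) :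
    pvALoop a l = l.any (fun i =>
      decide (PySem.List.pyGetD a i ' ' = PySem.List.pyGetD a (i+1) ' '
        ∧ PySem.Chars.count a [PySem.List.pyGetD a i ' '] = 2)) := by
  induction l with
  | nil => rfl
  | cons i rest ih =>
    obtain ⟨h0, h1⟩ := h i (List.mem_cons_self ..)
    have hrest : ∀ j ∈ rest, 0 ≤ j ∧ j + 1 < (a.length : Int) := fun j hj => h j (List.mem_cons_of_mem _ hj)
    have ha : a ≠ [] := by
      intro e; subst e; simp at h1; omega
    simp only [pvALoop, List.any_cons, ih hrest]
    by_cases heq : PySem.List.pyGetD a i ' ' = PySem.List.pyGetD a (i+1) ' '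
    · rw [if_pos heq, heq]
      by_cases h2 : PySem.Chars.count a [PySem.List.pyGetD a (i+1) ' '] = 2
      · simp [h2]
      · by_cases h3 : PySem.Chars.count a [PySem.List.pyGetD a (i+1) ' '] = 3
        · have := pv_findFrom_self_ne a i h0 (by omega) ha
          simp [h2, h3, this]
        · simp [h2, h3]
    · simp [heq]

-- B's loop is an 'any' over the items list
theorem pvBLoop_eq_any (a : List Char) (l : List (Char × Int)) :
    pvBLoop a l = l.any (fun p =>
      decide (p.2 = 2 ∧ ∃ idx, PySem.List.index? a p.1 = some idx
        ∧ PySem.List.pyGet? a ((idx : Int) + 1) = some p.1)) := by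
  induction l with
  | nil => rfl
  | cons p rest ih =>
    obtain ⟨d, c⟩ := p
    simp only [pvBLoop, List.any_cons, ih]
    by_cases h2 : c = 2
    · rcases hidx : PySem.List.index? a d with _ | idx
      · simp [h2]
      · by_cases hg : PySem.List.pyGet? a ((idx : Int) + 1) = some d
        · simp [h2, hg]
        · simp [h2, hg]
    · simp [h2]

-- a twice-occurring character splits the string canonically
theorem pv_count_two_decomp (a : List Char) (d : Char) (h : a.count d = 2) :
    ∃ p q r, a = p ++ d :: (q ++ d :: r) ∧ d ∉ p ∧ d ∉ q ∧ d ∉ r := by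
  have hd : d ∈ a := List.count_pos_iff.1 (by omega)
  obtain ⟨p, t, rfl, hp⟩ := List.eq_append_cons_of_mem hd
  have hcp : p.count d = 0 := List.count_eq_zero.2 hp
  have hct : t.count d = 1 := by
    simp [List.count_append, hcp] at h ⊢; omega
  have hdt : d ∈ t := List.count_pos_iff.1 (by omega)
  obtain ⟨q, r, rfl, hq⟩ := List.eq_append_cons_of_mem hdt
  have hcr : r.count d = 0 := by
    have hcq : q.count d = 0 := List.count_eq_zero.2 hq
    simp [List.count_append, hcq] at hct
    exact hct
  exact ⟨p, q, r, rfl, hp, hq, List.count_eq_zero.1 hcr⟩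

-- in that split the positions holding d are exactly p.length and p.length + q.length + 1
theorem pv_getElem_decomp (p q r : List Char) (d : Char) (hp : d ∉ p) (hq : d ∉ q) (hr : d ∉ r)
    (i : Nat) : (p ++ d :: (q ++ d :: r))[i]? = some d ↔ (i = p.length ∨ i = p.length + q.length + 1) := by
  constructor
  · intro h
    by_contra hc
    push_neg at hc
    obtain ⟨h1, h2⟩ := hc
    rcases Nat.lt_or_ge i p.length with hlt | hge
    · rw [List.getElem?_append_left (by omega)] at h
      exact hp (List.mem_of_getElem? h)
    · rw [List.getElem?_append_right (by omega)] at h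
      have hi' : i - p.length ≠ 0 := by omega
      obtain ⟨j, hj⟩ := Nat.exists_eq_succ_of_ne_zero hi'
      rw [hj] at h
      simp only [List.getElem?_cons_succ] at h
      rcases Nat.lt_or_ge j q.length with hlt2 | hge2
      · rw [List.getElem?_append_left (by omega)] at h
        exact hq (List.mem_of_getElem? h)
      · rw [List.getElem?_append_right (by omega)] at h
        have hj' : j - q.length ≠ 0 := by omega
        obtain ⟨k, hk⟩ := Nat.exists_eq_succ_of_ne_zero hj'
        rw [hk] at h
        simp only [List.getElem?_cons_succ] at h
        exact hr (List.mem_of_getElem? h)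
  · rintro (rfl | rfl)
    · rw [List.getElem?_append_right (by omega)]
      simp
    · rw [List.getElem?_append_right (by omega)]
      have h1 : p.length + q.length + 1 - p.length = q.length + 1 := by omega
      rw [h1]
      simp only [List.getElem?_cons_succ]
      rw [List.getElem?_append_right (by omega)]
      simp

-- a twice-occurring character with an adjacent equal pair ⇒ the first occurrence is followed by the same character
theorem pv_adj_of_pair (a : List Char) (d : Char) (h : a.count d = 2) (k : Nat)
    (h1 : a[k]? = some d) (h2 : a[k+1]? = some d) :
    ∃ idx, PySem.List.index? a d = some idx ∧ a[idx+1]? = some d := by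
  obtain ⟨p, q, r, rfl, hp, hq, hr⟩ := pv_count_two_decomp a d h
  have e1 := (pv_getElem_decomp p q r d hp hq hr k).1 h1
  have e2 := (pv_getElem_decomp p q r d hp hq hr (k+1)).1 h2
  have hQ : q.length = 0 := by rcases e1 with e1 | e1 <;> rcases e2 with e2 | e2 <;> omega
  refine ⟨p.length, ?_, ?_⟩
  · exact (PySem.List.index?_eq_some_iff _ _ _).2 ⟨p, _, rfl, rfl, hp⟩
  · exact (pv_getElem_decomp p q r d hp hq hr _).2 (Or.inr (by omega))

-- a twice-occurring character whose first occurrence is followed by itself gives an adjacent pair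
theorem pv_pair_of_adj (a : List Char) (d : Char) (h : a.count d = 2) (idx : Nat)
    (hidx : PySem.List.index? a d = some idx) (hadj : a[idx+1]? = some d) :
    ∃ k, k + 1 < a.length ∧ a[k]? = some d ∧ a[k+1]? = some d := by
  obtain ⟨p, q, r, rfl, hp, hq, hr⟩ := pv_count_two_decomp a d h
  have hfst : PySem.List.index? (p ++ d :: (q ++ d :: r)) d = some p.length :=
    (PySem.List.index?_eq_some_iff _ _ _).2 ⟨p, _, rfl, rfl, hp⟩
  rw [hfst] at hidx
  injection hidx with hidx
  subst hidx
  have e := (pv_getElem_decomp p q r d hp hq hr (p.length+1)).1 hadj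
  have hQ : q.length = 0 := by rcases e with e | e <;> omega
  refine ⟨p.length, ?_, ?_, hadj⟩
  · obtain ⟨hlt, -⟩ := List.getElem?_eq_some_iff.1 hadj
    omega
  · exact (pv_getElem_decomp p q r d hp hq hr _).2 (Or.inl rfl)

theorem pv_main (a : List Char) :
    pvALoop a (PySem.List.pyRange 0 (PySem.List.len a - 1) 1)
      = pvBLoop a ((a.foldl (fun d ch => d.insert ch (d.getD ch 0 + 1)) PySem.Dict.empty).items) := by
  have hbound : ∀ i ∈ PySem.List.pyRange 0 (PySem.List.len a - 1) 1, 0 ≤ i ∧ i + 1 < (a.length : Int) := by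
    intro i hi
    have := PySem.List.mem_pyRange_one.1 hi
    simp [PySem.List.len_eq] at this
    omega
  rw [PySem.Dict.foldl_insert_getD_add_one_eq_counter, PySem.Dict.items_counter,
    pvALoop_eq_any a _ hbound, pvBLoop_eq_any, Bool.eq_iff_iff]
  simp only [List.any_map, List.any_eq_true, Function.comp, decide_eq_true_eq]
  constructor
  · rintro ⟨i, hi, heq, hcnt⟩
    obtain ⟨hi0, hi1⟩ := hbound i hi
    have hk1 : i.toNat + 1 < a.length := by omega
    have hk0 : i.toNat < a.length := by omega
    have hsucc : (i + 1).toNat = i.toNat + 1 := by omega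
    simp only [PySem.List.pyGetD_eq_getElem a ' ' hi0 (by omega : i < (a.length : Int)),
      PySem.List.pyGetD_eq_getElem a ' ' (by omega : (0:Int) ≤ i + 1) (by omega : i + 1 < (a.length : Int)),
      hsucc] at heq hcnt
    set d := a[i.toNat] with hd
    rw [pv_count_singleton] at hcnt
    obtain ⟨idx, hidx, hget⟩ := pv_adj_of_pair a d hcnt i.toNat
      (List.getElem?_eq_some_iff.2 ⟨hk0, rfl⟩)
      (List.getElem?_eq_some_iff.2 ⟨hk1, heq.symm⟩)
    refine ⟨d, (PySem.Set.mem_ofList a d).2 (List.getElem_mem hk0), by exact_mod_cast hcnt, idx, hidx, ?_⟩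
    have hc : ((idx : Int) + 1) = (((idx + 1 : Nat) : Nat) : Int) := by push_cast; ring
    rw [hc, PySem.List.pyGet?_natCast]
    exact hget
  · rintro ⟨d, hdmem, hcnt, idx, hidx, hget⟩
    have hcnt' : a.count d = 2 := by exact_mod_cast hcnt
    have hget' : a[idx+1]? = some d := by
      have : ((idx : Int) + 1) = (((idx + 1 : Nat) : Nat) : Int) := by push_cast; ring
      rw [this, PySem.List.pyGet?_natCast] at hget
      exact hget
    obtain ⟨k, hk1, ha1, ha2⟩ := pv_pair_of_adj a d hcnt' idx hidx hget'
    obtain ⟨hlt0, he0⟩ := List.getElem?_eq_some_iff.1 ha1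
    obtain ⟨hlt1, he1⟩ := List.getElem?_eq_some_iff.1 ha2
    have hsucc : ((k : Int) + 1).toNat = k + 1 := by omega
    refine ⟨(k : Int), PySem.List.mem_pyRange_one.2 ⟨by positivity, by simp [PySem.List.len_eq]; omega⟩, ?_, ?_⟩
    · simp only [PySem.List.pyGetD_eq_getElem a ' ' (by positivity : (0:Int) ≤ (k : Int)) (by exact_mod_cast hlt0),
        PySem.List.pyGetD_eq_getElem a ' ' (by positivity : (0:Int) ≤ (k : Int) + 1) (by omega : (k : Int) + 1 < (a.length : Int)),
        hsucc, Int.toNat_natCast]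
      rw [he0, he1]
    · simp only [PySem.List.pyGetD_eq_getElem a ' ' (by positivity : (0:Int) ≤ (k : Int)) (by exact_mod_cast hlt0),
        Int.toNat_natCast]
      rw [he0, pv_count_singleton]
      exact hcnt'

-- ===== VERDICT (by name: the statement is the Claim_ definition above) =====
theorem number_adjacent_spec : Claim_equal_number_adjacent := by
  intro n _
  unfold Spec_number_adjacent number_adjacent number_adjacent_alt
  exact pv_main (PySem.Int.toChars n)
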